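-- pv_equiv track=rewrite | github.com/LouisVie61/PyCode | ProblemSolving/LeetCode1079.py | numTitlePossibilities
-- ===== SOURCE A (Python) =====
-- def numTitlePossibilities(titles: str) -> int:
--     visited = set()
--
--     def gen_title(word, used):
--         if word:
--             visited.add("".join(word))
--
--         for i in range(len(titles)):
--             if used[i]:
--                 continue
--
--             if i > 0 and titles[i] == titles[i - 1] and not used[i - 1]:
--                 continue
--
--             used[i] = True
--             word.append(titles[i])
--
--             gen_title(word, used)
--
--             used[i] = False
--             word.pop()
--
--     titles = "".join(sorted(titles))
--     gen_title([], [False] * len(titles))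
--     return len(visited)
-- ===== SOURCE B (Python) =====
-- def numTitlePossibilities(titles: str) -> int:
--     counts = {}
--     for ch in titles:
--         counts[ch] = counts.get(ch, 0) + 1
--
--     def dfs():
--         total = 0
--         for c in counts:
--             if counts[c]:
--                 counts[c] -= 1
--                 total += 1 + dfs()
--                 counts[c] += 1
--         return total
--
--     return dfs()
-- ===== Notes on version B (the rewrite author's own statement) =====
-- stated objective: alternative
-- what changed: A sorts the tiles and runs a mutating used[]-mask backtracking that joins every distinct sequence into a string, inserts it into a set and returns the set's size; B never materialises any sequence: it builds a character-count dictionary once and counts by a pure recursion total += 1 + dfs() over the counts, so no strings, no set and no used-mask exist.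
import Mathlib
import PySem

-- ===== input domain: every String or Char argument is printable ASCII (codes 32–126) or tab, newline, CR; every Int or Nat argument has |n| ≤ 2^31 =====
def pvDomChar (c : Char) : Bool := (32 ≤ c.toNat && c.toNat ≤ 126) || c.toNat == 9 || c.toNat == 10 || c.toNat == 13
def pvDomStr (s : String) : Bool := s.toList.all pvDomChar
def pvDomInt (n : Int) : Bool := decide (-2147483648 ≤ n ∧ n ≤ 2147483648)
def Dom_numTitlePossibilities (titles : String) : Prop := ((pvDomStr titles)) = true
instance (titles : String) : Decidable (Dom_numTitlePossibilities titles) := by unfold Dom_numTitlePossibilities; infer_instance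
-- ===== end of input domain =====

-- B replaces A's exponential string-set backtracking (which materialises every distinct sequence in a set)
-- by a pure counting recursion over a character-count dictionary; objective: alternative/faster (no strings or set built).

-- ===== PORT A =====
-- A's inner 'for i in range(len(titles))' loop of gen_title, ported as recursion on the index i.
-- 'gen' is the recursive call to gen_title (tied at one fuel level lower in pvGenA).
def pvLoopA (s : List Char) (gen : List Char → List Bool → PySem.Set String → PySem.Set String)
    (word : List Char) (used : List Bool) (i : Nat) (vis : PySem.Set String) : PySem.Set String :=
  if _h : i < s.length then
    pvLoopA s gen word used (i + 1)
      (if used.getD i false then vis                 -- if used[i]: continue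
       else if 0 < i ∧ s.getD i ' ' = s.getD (i-1) ' ' ∧ used.getD (i-1) false = false then vis
                                                    -- dedup skip (indices i, i-1 are in range)
       else gen (word ++ [s.getD i ' ']) (used.set i true) vis)   -- mutate, recurse, backtrack
  else vis
termination_by s.length - i

-- gen_title itself; fuel only makes the recursion structural (the entry call supplies enough:
-- each nested call marks one more tile used, so the depth never exceeds len(titles)+1).
def pvGenA (s : List Char) : Nat → List Char → List Bool → PySem.Set String → PySem.Set String
  | 0, _, _, vis => vis
  | fuel+1, word, used, vis =>
    pvLoopA s (pvGenA s fuel) word used 0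
      (if word.isEmpty then vis else PySem.Set.add vis (String.ofList word))  -- if word: visited.add("".join(word))

def numTitlePossibilities (titles : String) : Int :=
  let s := PySem.List.sorted titles.toList id        -- titles = "".join(sorted(titles))
  PySem.Set.len (pvGenA s (s.length + 1) [] (List.replicate s.length false) PySem.Set.empty)

-- ===== PORT B =====
-- Source B's dfs over the (persistent) count dictionary; 'counts[c] -= 1 … counts[c] += 1' around the
-- recursive call is passing the decremented dict to the call only. Fuel = totality device (depth ≤ len+1).
def pvDfsB : Nat → PySem.Dict Char Int → Int
  | 0, _ => 0
  | fuel+1, counts =>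
    counts.keys.foldl
      (fun total c =>
        if counts.getD c 0 ≠ 0 then               -- if counts[c]:
          total + (1 + pvDfsB fuel (counts.modify c 0 (· - 1)))
        else total) 0

def numTitlePossibilities_alt (titles : String) : Int :=
  let counts := titles.toList.foldl (fun d ch => d.insert ch (d.getD ch 0 + 1)) PySem.Dict.empty
  pvDfsB (titles.toList.length + 1) counts

-- ===== PRECONDITION & SPEC =====
def Spec_numTitlePossibilities (titles : String) (out : Int) : Prop := out = numTitlePossibilities_alt titles
instance (titles : String) (out : Int) : Decidable (Spec_numTitlePossibilities titles out) := by unfold Spec_numTitlePossibilities; infer_instance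

-- ===== CLAIM (what is proved, stated in full; the proofs are below) =====
def Claim_equal_numTitlePossibilities : Prop := ∀ (titles : String), Dom_numTitlePossibilities titles → Spec_numTitlePossibilities titles (numTitlePossibilities titles)

-- ===== LEMMAS AND PROOFS =====

-- ---------- A side ----------

def pvAllowed (s : List Char) (used : List Bool) (i : Nat) : Bool :=
  decide (i < s.length) && !(used.getD i false) &&
    !(decide (0 < i) && decide (s.getD i ' ' = s.getD (i-1) ' ') && !(used.getD (i-1) false))

def pvInv (s : List Char) (used : List Bool) : Prop :=
  ∀ i, i + 1 < s.length → s.getD (i+1) ' ' = s.getD i ' ' →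
    used.getD (i+1) false = true → used.getD i false = true

lemma pvAllowed_iff_simple (s : List Char) (used : List Bool) (i : Nat) :
    pvAllowed s used i = true ↔
      i < s.length ∧ used.getD i false = false ∧
        ¬(0 < i ∧ s.getD i ' ' = s.getD (i-1) ' ' ∧ used.getD (i-1) false = false) := by
  unfold pvAllowed
  rcases h1 : used.getD i false <;> rcases h2 : used.getD (i-1) false <;>
    by_cases h3 : i < s.length <;> by_cases h4 : 0 < i <;>
      by_cases h5 : s.getD i ' ' = s.getD (i-1) ' ' <;> simp_all

lemma pvMono (s : List Char) (hs : List.Pairwise (· ≤ ·) s) {i j : Nat}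
    (hij : i ≤ j) (hj : j < s.length) : s.getD i ' ' ≤ s.getD j ' ' := by
  rcases Nat.eq_or_lt_of_le hij with rfl | hlt
  · exact le_refl _
  · have hi : i < s.length := lt_trans hlt hj
    rw [List.getD_eq_getElem _ _ hi, List.getD_eq_getElem _ _ hj]
    exact List.pairwise_iff_getElem.mp hs i j hi hj hlt

lemma pvAllowed_iff (s : List Char) (used : List Bool)
    (hs : List.Pairwise (· ≤ ·) s) (hinv : pvInv s used) (j : Nat) :
    pvAllowed s used j = true ↔
      j < s.length ∧ used.getD j false = false ∧
        ∀ k < j, s.getD k ' ' = s.getD j ' ' → used.getD k false = true := by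
  rw [pvAllowed_iff_simple]
  constructor
  · rintro ⟨hj, hu, hskip⟩
    refine ⟨hj, hu, ?_⟩
    rcases Nat.eq_zero_or_pos j with rfl | hj0
    · intro k hk; omega
    · by_cases heq : s.getD j ' ' = s.getD (j-1) ' '
      · -- block case: used[j-1] = true, chain downwards with pvInv
        have hu1 : used.getD (j-1) false = true := by
          rcases h : used.getD (j-1) false with _ | _
          · exact absurd ⟨hj0, heq, h⟩ hskip
          · rfl
        have key : ∀ d k, k < j → s.getD k ' ' = s.getD j ' ' → j - 1 - k = d →
            used.getD k false = true := by
          intro d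
          induction d using Nat.strong_induction_on with
          | _ d ihd =>
            intro k hk hks hd
            by_cases hk1 : k = j - 1
            · subst hk1; exact hu1
            · have hkj : k + 1 ≤ j - 1 := by omega
              have hle1 : s.getD k ' ' ≤ s.getD (k+1) ' ' :=
                pvMono s hs (by omega) (by omega)
              have hle2 : s.getD (k+1) ' ' ≤ s.getD (j-1) ' ' :=
                pvMono s hs (by omega) (by omega)
              have hle3 : s.getD (j-1) ' ' ≤ s.getD j ' ' :=
                pvMono s hs (by omega) hj
              have hs1 : s.getD (k+1) ' ' = s.getD j ' ' := by
                have : s.getD j ' ' ≤ s.getD (k+1) ' ' := hks ▸ hle1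
                exact le_antisymm (le_trans hle2 hle3) this
              have hu2 : used.getD (k+1) false = true :=
                ihd (j - 1 - (k+1)) (by omega) (k+1) (by omega) hs1 rfl
              exact hinv k (by omega) (by rw [hs1, hks]) hu2
        exact fun k hk hks => key (j - 1 - k) k hk hks rfl
      · -- new block: no earlier index has the same character
        intro k hk hks
        exfalso
        have h1 : s.getD k ' ' ≤ s.getD (j-1) ' ' := pvMono s hs (by omega) (by omega)
        have h2 : s.getD (j-1) ' ' ≤ s.getD j ' ' := pvMono s hs (by omega) hj
        exact heq (le_antisymm (hks ▸ h1 : s.getD j ' ' ≤ s.getD (j-1) ' ') h2)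
  · rintro ⟨hj, hu, hall⟩
    refine ⟨hj, hu, ?_⟩
    rintro ⟨hj0, heq, hu1⟩
    have := hall (j-1) (by omega) heq.symm
    rw [this] at hu1
    simp at hu1

lemma pvAllowed_ne (s : List Char) (used : List Bool)
    (hs : List.Pairwise (· ≤ ·) s) (hinv : pvInv s used) {i j : Nat} (hij : i < j)
    (hi : pvAllowed s used i = true) (hj : pvAllowed s used j = true) :
    s.getD i ' ' ≠ s.getD j ' ' := by
  intro heq
  rcases (pvAllowed_iff s used hs hinv j).mp hj with ⟨_, _, hall⟩
  rcases (pvAllowed_iff_simple s used i).mp hi with ⟨_, hui, _⟩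
  rw [hall i hij heq] at hui
  simp at hui

lemma pvGetD_set (used : List Bool) (i : Nat) (m : Nat) (hi : i < used.length) :
    (used.set i true).getD m false = if m = i then true else used.getD m false := by
  by_cases hmi : m = i
  · subst hmi
    rw [if_pos rfl, List.getD_eq_getElem _ _ (by simpa using hi)]
    simp [List.getElem_set_self]
  · rw [if_neg hmi]
    by_cases hm : m < used.length
    · rw [List.getD_eq_getElem _ _ (by simpa using hm), List.getD_eq_getElem _ _ hm]
      rw [List.getElem_set_ne (by omega)]
    · rw [List.getD_eq_default _ _ (by simpa using (by omega : used.length ≤ m)),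
        List.getD_eq_default _ _ (by omega)]

lemma pvInv_set (s : List Char) (used : List Bool)
    (hs : List.Pairwise (· ≤ ·) s) (hinv : pvInv s used) (hlen : used.length = s.length)
    {i : Nat} (hi : pvAllowed s used i = true) : pvInv s (used.set i true) := by
  rcases (pvAllowed_iff s used hs hinv i).mp hi with ⟨hin, hui, hall⟩
  have hilen : i < used.length := by omega
  intro k hk1 heq hu1
  rw [pvGetD_set used i _ hilen] at hu1 ⊢
  by_cases hki : k = i
  · simp [hki]
  · rw [if_neg hki]
    by_cases hk1i : k + 1 = i
    · -- used[i]=true gives nothing; but k < i with s[k] = s[i]: use hall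
      exact hall k (by omega) (by rw [← hk1i, heq])
    · rw [if_neg hk1i] at hu1
      exact hinv k hk1 heq hu1

def pvRemIdx (s : List Char) (used : List Bool) : List Nat :=
  (List.range s.length).filter (fun i => !(used.getD i false))

def pvRemM (s : List Char) (used : List Bool) : Multiset Char :=
  ((pvRemIdx s used).map (fun i => s.getD i ' ') : List Char)

lemma pvRange_split {n i : Nat} (h : i < n) :
    List.range n = List.range i ++ i :: List.range' (i+1) (n - i - 1) := by
  have h1 : List.range' 0 i ++ List.range' i (n - i) = List.range' 0 n := by
    have := List.range'_append (s := 0) (m := i) (n := n - i) (step := 1)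
    simp only [Nat.one_mul, Nat.zero_add] at this
    rw [this]
    congr 1
    omega
  have h2 : List.range' i (n - i) = i :: List.range' (i+1) (n - i - 1) := by
    conv_lhs => rw [show n - i = (n - i - 1) + 1 by omega]
    rw [List.range'_succ]
  rw [List.range_eq_range', ← h1, h2, List.range_eq_range']

lemma pvRemIdx_split (s : List Char) (used : List Bool) (hlen : used.length = s.length)
    {i : Nat} (hi : i < s.length) (hu : used.getD i false = false) :
    pvRemIdx s used
      = (List.range i).filter (fun k => !(used.getD k false))
        ++ i :: (List.range' (i+1) (s.length - i - 1)).filter (fun k => !(used.getD k false))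
    ∧ pvRemIdx s (used.set i true)
      = (List.range i).filter (fun k => !(used.getD k false))
        ++ (List.range' (i+1) (s.length - i - 1)).filter (fun k => !(used.getD k false)) := by
  have hilen : i < used.length := by omega
  have hA : ∀ k ∈ List.range i, ((used.set i true).getD k false) = (used.getD k false) := by
    intro k hk
    rw [pvGetD_set used i k hilen, if_neg (by have := List.mem_range.mp hk; omega)]
  have hB : ∀ k ∈ List.range' (i+1) (s.length - i - 1),
      ((used.set i true).getD k false) = (used.getD k false) := by
    intro k hk
    rcases List.mem_range'.mp hk with ⟨m, _, rfl⟩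
    rw [pvGetD_set used i _ hilen, if_neg (by omega)]
  constructor
  · unfold pvRemIdx
    rw [pvRange_split hi, List.filter_append, List.filter_cons]
    simp [show used[i]?.getD false = false from hu]
  · unfold pvRemIdx
    rw [pvRange_split hi, List.filter_append, List.filter_cons]
    have hset : ((used.set i true).getD i false) = true := by
      rw [pvGetD_set used i i hilen]; simp
    simp only [hset, Bool.not_true, if_neg (by simp : ¬(false = true))]
    have eA : (List.range i).filter (fun k => !((used.set i true).getD k false))
        = (List.range i).filter (fun k => !(used.getD k false)) :=
      List.filter_congr (fun k hk => by rw [hA k hk])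
    have eB : (List.range' (i+1) (s.length - i - 1)).filter
          (fun k => !((used.set i true).getD k false))
        = (List.range' (i+1) (s.length - i - 1)).filter (fun k => !(used.getD k false)) :=
      List.filter_congr (fun k hk => by rw [hB k hk])
    rw [eA, eB]

lemma pvRem_set (s : List Char) (used : List Bool) (hlen : used.length = s.length)
    {i : Nat} (hi : i < s.length) (hu : used.getD i false = false) :
    pvRemM s used = s.getD i ' ' ::ₘ pvRemM s (used.set i true) := by
  rcases pvRemIdx_split s used hlen hi hu with ⟨h1, h2⟩
  unfold pvRemM
  rw [h1, h2]
  rw [List.map_append, List.map_cons, List.map_append]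
  exact Multiset.coe_eq_coe.mpr List.perm_middle

lemma pvRemIdx_set_len (s : List Char) (used : List Bool) (hlen : used.length = s.length)
    {i : Nat} (hi : i < s.length) (hu : used.getD i false = false) :
    (pvRemIdx s used).length = (pvRemIdx s (used.set i true)).length + 1 := by
  rcases pvRemIdx_split s used hlen hi hu with ⟨h1, h2⟩
  rw [h1, h2]
  simp
  omega

lemma pvMem_remM (s : List Char) (used : List Bool) {i : Nat}
    (hi : i < s.length) (hu : used.getD i false = false) :
    s.getD i ' ' ∈ pvRemM s used := by
  unfold pvRemM
  rw [Multiset.mem_coe]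
  exact List.mem_map_of_mem
    (List.mem_filter.mpr ⟨List.mem_range.mpr hi, by simp [show used[i]?.getD false = false from hu]⟩)

def pvF (m : Multiset Char) : Nat :=
  m.toFinset.attach.sum (fun c => 1 + pvF (m.erase c.1))
termination_by m.card
decreasing_by exact Multiset.card_erase_lt_of_mem (Multiset.mem_toFinset.mp c.2)

lemma pvF_eq (m : Multiset Char) : pvF m = ∑ c ∈ m.toFinset, (1 + pvF (m.erase c)) := by
  rw [pvF]; exact Finset.sum_attach m.toFinset (fun c => 1 + pvF (m.erase c))

lemma pvSum_allowed (s : List Char) (used : List Bool)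
    (hs : List.Pairwise (· ≤ ·) s) (hinv : pvInv s used) :
    ((((List.range s.length).filter (pvAllowed s used)).map
        (fun j => 1 + pvF ((pvRemM s used).erase (s.getD j ' ')))).sum)
      = pvF (pvRemM s used) := by
  set M := pvRemM s used with hM
  set l := (List.range s.length).filter (pvAllowed s used) with hl
  have hmeml : ∀ j ∈ l, pvAllowed s used j = true := by
    intro j hj
    simpa using (List.mem_filter.mp hj).2
  have hpl : l.Pairwise (· < ·) :=
    List.Pairwise.sublist (List.filter_sublist) List.pairwise_lt_range
  have hpne : l.Pairwise (fun a b => s.getD a ' ' ≠ s.getD b ' ') := by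
    refine List.Pairwise.imp_of_mem ?_ hpl
    intro a b ha hb hab
    exact pvAllowed_ne s used hs hinv hab (hmeml a ha) (hmeml b hb)
  have hnd : (l.map (fun j => s.getD j ' ')).Nodup := List.pairwise_map.mpr hpne
  have hfin : (l.map (fun j => s.getD j ' ')).toFinset = M.toFinset := by
    ext c
    simp only [List.mem_toFinset, List.mem_map, Multiset.mem_toFinset]
    constructor
    · rintro ⟨j, hj, rfl⟩
      rcases (pvAllowed_iff_simple s used j).mp (hmeml j hj) with ⟨hjn, hju, -⟩
      exact pvMem_remM s used hjn hju
    · intro hc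
      have hex : ∃ k, k < s.length ∧ used.getD k false = false ∧ s.getD k ' ' = c := by
        rw [hM] at hc
        unfold pvRemM at hc
        rw [Multiset.mem_coe, List.mem_map] at hc
        rcases hc with ⟨m, hm, hmc⟩
        rcases List.mem_filter.mp hm with ⟨hmr, hmu⟩
        exact ⟨m, List.mem_range.mp hmr, by simpa using hmu, hmc⟩
      classical
      let j := Nat.find hex
      have hspec := Nat.find_spec hex
      refine ⟨j, List.mem_filter.mpr ⟨List.mem_range.mpr hspec.1, ?_⟩, hspec.2.2⟩
      rw [pvAllowed_iff s used hs hinv]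
      refine ⟨hspec.1, hspec.2.1, ?_⟩
      intro k hk hks
      rcases h : used.getD k false with _ | _
      · exact absurd ⟨by omega, h, by rw [hks, hspec.2.2]⟩ (Nat.find_min hex hk)
      · rfl
  rw [pvF_eq M, ← hfin, List.sum_toFinset _ hnd, List.map_map]
  simp only [Function.comp_def]

def pvGenSpec (s : List Char) (bound : Nat)
    (gen : List Char → List Bool → PySem.Set String → PySem.Set String) : Prop :=
  ∀ word used vis, used.length = s.length → pvInv s used →
    (pvRemIdx s used).length < bound →
    (∀ v ∈ vis, ¬ word <+: v.toList) →
    ∃ news, gen word used vis = vis ++ news ∧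
      news.length = (if word.isEmpty then 0 else 1) + pvF (pvRemM s used) ∧
      ∀ v ∈ news, word <+: v.toList

lemma pvLoopA_spec (s : List Char) (bound : Nat)
    (gen : List Char → List Bool → PySem.Set String → PySem.Set String)
    (hs : List.Pairwise (· ≤ ·) s) (hgen : pvGenSpec s bound gen)
    (word : List Char) (used : List Bool) (hlen : used.length = s.length) (hinv : pvInv s used)
    (hb : (pvRemIdx s used).length ≤ bound) :
    ∀ d i vis, s.length - i ≤ d →
      (∀ v ∈ vis, ∀ j, i ≤ j → pvAllowed s used j = true →
        ¬ (word ++ [s.getD j ' ']) <+: v.toList) →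
      ∃ news, pvLoopA s gen word used i vis = vis ++ news ∧
        news.length = (((List.range' i (s.length - i)).filter (pvAllowed s used)).map
            (fun j => 1 + pvF ((pvRemM s used).erase (s.getD j ' ')))).sum ∧
        ∀ v ∈ news, ∃ j, i ≤ j ∧ pvAllowed s used j = true ∧
          (word ++ [s.getD j ' ']) <+: v.toList := by
  intro d
  induction d with
  | zero =>
    intro i vis hd hfresh
    have hin : ¬ i < s.length := by omega
    rw [pvLoopA, dif_neg hin]
    refine ⟨[], by simp, ?_, by simp⟩
    rw [show s.length - i = 0 by omega]
    simp
  | succ d ih =>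
    intro i vis hd hfresh
    by_cases hi : i < s.length
    · rw [pvLoopA, dif_pos hi]
      have hsplit : List.range' i (s.length - i) = i :: List.range' (i+1) (s.length - i - 1) := by
        conv_lhs => rw [show s.length - i = (s.length - i - 1) + 1 by omega]
        rw [List.range'_succ]
      have hsub : s.length - (i+1) = s.length - i - 1 := by omega
      by_cases hA : pvAllowed s used i = true
      · rcases (pvAllowed_iff_simple s used i).mp hA with ⟨-, hu, hnc⟩
        have hE : (if used.getD i false = true then vis
            else if 0 < i ∧ s.getD i ' ' = s.getD (i-1) ' ' ∧ used.getD (i-1) false = false then vis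
            else gen (word ++ [s.getD i ' ']) (used.set i true) vis)
            = gen (word ++ [s.getD i ' ']) (used.set i true) vis := by
          rw [if_neg (by simp [show used[i]?.getD false = false from hu]), if_neg hnc]
        rw [hE]
        obtain ⟨newsc, hgc, hlc, hpc⟩ := hgen (word ++ [s.getD i ' ']) (used.set i true) vis
          (by rw [List.length_set]; exact hlen)
          (pvInv_set s used hs hinv hlen hA)
          (by have := pvRemIdx_set_len s used hlen hi hu; omega)
          (fun v hv => hfresh v hv i (le_refl i) hA)
        rw [hgc]
        have hfr : ∀ v ∈ vis ++ newsc, ∀ j, i + 1 ≤ j → pvAllowed s used j = true →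
            ¬ (word ++ [s.getD j ' ']) <+: v.toList := by
          intro v hv j hj hAj
          rcases List.mem_append.mp hv with hv | hv
          · exact hfresh v hv j (by omega) hAj
          · intro hpref
            have hpref2 := hpc v hv
            have hlen_eq : (word ++ [s.getD j ' ']).length = (word ++ [s.getD i ' ']).length := by
              simp
            have h12 : (word ++ [s.getD j ' ']) = (word ++ [s.getD i ' ']) :=
              (List.prefix_of_prefix_length_le hpref hpref2 (le_of_eq hlen_eq)).eq_of_length
                hlen_eq
            have hchar : s.getD j ' ' = s.getD i ' ' := by simpa using h12
            exact pvAllowed_ne s used hs hinv (by omega : i < j) hA hAj hchar.symm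
        obtain ⟨newsr, hgr, hlr, hpr⟩ := ih (i+1) (vis ++ newsc) (by omega) hfr
        refine ⟨newsc ++ newsr, by rw [hgr]; simp, ?_, ?_⟩
        · have herase : pvRemM s (used.set i true) = (pvRemM s used).erase (s.getD i ' ') := by
            rw [pvRem_set s used hlen hi hu, Multiset.erase_cons_head]
          rw [List.length_append, hlc, hlr, herase, hsplit, List.filter_cons]
          simp [hA, hsub]
        · intro v hv
          rcases List.mem_append.mp hv with hv | hv
          · exact ⟨i, le_refl i, hA, hpc v hv⟩
          · obtain ⟨j, hj1, hj2, hj3⟩ := hpr v hv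
            exact ⟨j, by omega, hj2, hj3⟩
      · have hE : (if used.getD i false = true then vis
            else if 0 < i ∧ s.getD i ' ' = s.getD (i-1) ' ' ∧ used.getD (i-1) false = false then vis
            else gen (word ++ [s.getD i ' ']) (used.set i true) vis) = vis := by
          rcases h : used.getD i false with _ | _
          · have hnc : 0 < i ∧ s.getD i ' ' = s.getD (i-1) ' ' ∧ used.getD (i-1) false = false := by
              by_contra hnc
              exact hA ((pvAllowed_iff_simple s used i).mpr ⟨hi, h, hnc⟩)
            rw [if_neg (by simp), if_pos hnc]
          · exact if_pos rfl
        rw [hE]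
        obtain ⟨news, hg, hl, hp⟩ := ih (i+1) vis (by omega)
          (fun v hv j hj hAj => hfresh v hv j (by omega) hAj)
        refine ⟨news, hg, ?_, ?_⟩
        · rw [hl, hsplit, List.filter_cons, if_neg (by simp [hA]), hsub]
        · intro v hv
          obtain ⟨j, hj1, hj2, hj3⟩ := hp v hv
          exact ⟨j, by omega, hj2, hj3⟩
    · rw [pvLoopA, dif_neg hi]
      refine ⟨[], by simp, ?_, by simp⟩
      rw [show s.length - i = 0 by omega]
      simp

lemma pvGenA_spec (s : List Char) (hs : List.Pairwise (· ≤ ·) s) :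
    ∀ fuel, pvGenSpec s fuel (pvGenA s fuel) := by
  intro fuel
  induction fuel with
  | zero => intro word used vis _ _ hbound _; omega
  | succ fuel ih =>
    intro word used vis hlen hinv hbound hfresh
    rw [pvGenA]
    have hrng : List.range' 0 (s.length - 0) = List.range s.length := by
      rw [Nat.sub_zero, List.range_eq_range']
    by_cases hw : word.isEmpty
    · have hwe : word = [] := List.isEmpty_iff.mp hw
      rw [if_pos hw]
      obtain ⟨news, h1, h2, h3⟩ := pvLoopA_spec s fuel (pvGenA s fuel) hs ih word used hlen hinv
        (by omega) s.length 0 vis (by omega)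
        (fun v hv j _ _ hpref =>
          hfresh v hv ((List.prefix_append word [s.getD j ' ']).trans hpref))
      refine ⟨news, h1, ?_, fun v _ => hwe ▸ List.nil_prefix⟩
      rw [h2, hrng, pvSum_allowed s used hs hinv, hw]
      simp
    · have hmem : String.ofList word ∉ vis := fun hmem =>
        hfresh _ hmem (by rw [String.toList_ofList])
      rw [if_neg hw, PySem.Set.add_of_not_mem hmem]
      have hfr : ∀ v ∈ vis ++ [String.ofList word], ∀ j, 0 ≤ j →
          pvAllowed s used j = true → ¬ (word ++ [s.getD j ' ']) <+: v.toList := by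
        intro v hv j _ _ hpref
        rcases List.mem_append.mp hv with hv | hv
        · exact hfresh v hv ((List.prefix_append word [s.getD j ' ']).trans hpref)
        · have hveq : v = String.ofList word := by simpa using hv
          subst hveq
          rw [String.toList_ofList] at hpref
          have := hpref.length_le
          simp at this
      obtain ⟨news, h1, h2, h3⟩ := pvLoopA_spec s fuel (pvGenA s fuel) hs ih word used hlen hinv
        (by omega) s.length 0 (vis ++ [String.ofList word]) (by omega) hfr
      refine ⟨String.ofList word :: news, ?_, ?_, ?_⟩
      · rw [h1]; simp
      · rw [List.length_cons, h2, hrng, pvSum_allowed s used hs hinv, if_neg hw]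
        omega
      · intro v hv
        rcases List.mem_cons.mp hv with rfl | hv
        · rw [String.toList_ofList]
        · obtain ⟨j, -, -, hj3⟩ := h3 v hv
          exact (List.prefix_append word [s.getD j ' ']).trans hj3

lemma pvA_eq (titles : String) :
    numTitlePossibilities titles = (pvF (titles.toList : Multiset Char) : Int) := by
  unfold numTitlePossibilities
  set s := PySem.List.sorted titles.toList id with hsdef
  have hs : List.Pairwise (· ≤ ·) s := PySem.List.sorted_pairwise titles.toList id
  have hperm : s.Perm titles.toList := PySem.List.sorted_perm titles.toList id false
  have hrepl : ∀ k, (List.replicate s.length false).getD k false = false := by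
    intro k
    by_cases hk : k < s.length
    · rw [List.getD_eq_getElem _ _ (by simpa using hk)]; simp
    · rw [List.getD_eq_default _ _ (by simpa using (by omega : s.length ≤ k))]
  have hinv : pvInv s (List.replicate s.length false) := by
    intro i _ _ h
    rw [hrepl] at h
    exact absurd h (by simp)
  have hidx : pvRemIdx s (List.replicate s.length false) = List.range s.length := by
    unfold pvRemIdx
    apply List.filter_eq_self.mpr
    intro a _
    rw [hrepl]
    rfl
  have hbound : (pvRemIdx s (List.replicate s.length false)).length < s.length + 1 := by
    rw [hidx]; simp
  obtain ⟨news, h1, h2, h3⟩ := pvGenA_spec s hs (s.length + 1) [] (List.replicate s.length false)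
    PySem.Set.empty (by simp) hinv hbound (by intro v hv; simp [PySem.Set.empty] at hv)
  have hM : pvRemM s (List.replicate s.length false) = (s : Multiset Char) := by
    unfold pvRemM
    rw [hidx]
    congr 1
    apply List.ext_getElem
    · simp
    · intro n hn1 hn2
      simp only [List.getElem_map, List.getElem_range]
      rw [List.getD_eq_getElem _ _ (by simpa using hn2)]
  show (pvGenA s (s.length + 1) [] (List.replicate s.length false) PySem.Set.empty).len
      = ((pvF (titles.toList : Multiset Char) : Nat) : Int)
  rw [h1]
  have hlen : (PySem.Set.empty ++ news : PySem.Set String).len = (news.length : Int) := by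
    simp [PySem.Set.len, PySem.Set.empty]
  rw [hlen, h2, hM]
  have hco : (s : Multiset Char) = (titles.toList : Multiset Char) := Multiset.coe_eq_coe.mpr hperm
  rw [hco]
  simp

-- ---------- B side ----------
def pvMS (d : PySem.Dict Char Int) : Multiset Char :=
  (d.keys.map (fun c => Multiset.replicate (d.getD c 0).toNat c)).sum

lemma pvCount (l : List Char) (f : Char → Nat) (hl : l.Nodup) (a : Char) :
    Multiset.count a ((l.map (fun c => Multiset.replicate (f c) c)).sum)
      = if a ∈ l then f a else 0 := by
  induction l with
  | nil => simp
  | cons c l ih =>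
    rcases List.nodup_cons.mp hl with ⟨hc, hl'⟩
    simp only [List.map_cons, List.sum_cons, Multiset.count_add, Multiset.count_replicate,
      List.mem_cons, ih hl']
    by_cases hac : a = c
    · subst hac; simp [hc]
    · simp [hac, Ne.symm hac]

lemma pvKeys_modify (d : PySem.Dict Char Int) {c : Char} (hc : c ∈ d.keys) (f : Int → Int) :
    (d.modify c 0 f).keys = d.keys := by
  rw [PySem.Dict.keys_modify]
  exact PySem.Dict.keys_insert_of_contains _ _ ((PySem.Dict.contains_iff_mem_keys _ _).mpr hc)

lemma pvMS_counter (xs : List Char) : pvMS (PySem.Dict.counter xs) = (xs : Multiset Char) := by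
  unfold pvMS
  ext a
  rw [pvCount _ _ (by rw [PySem.Dict.keys_counter]; exact PySem.Set.nodup_ofList xs)]
  simp only [PySem.Dict.keys_counter, PySem.Dict.getD_counter]
  by_cases h : a ∈ xs
  · simp [PySem.Set.mem_ofList, h]
  · simp [PySem.Set.mem_ofList, h]

lemma pvMS_modify (d : PySem.Dict Char Int) (hnd : d.keys.Nodup) {c : Char}
    (hc : c ∈ d.keys) (hpos : 0 < d.getD c 0) :
    pvMS (d.modify c 0 (· - 1)) = (pvMS d).erase c := by
  unfold pvMS
  ext a
  rw [pvCount _ _ (by rw [pvKeys_modify d hc]; exact hnd)]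
  by_cases hac : a = c
  · subst hac
    rw [Multiset.count_erase_self, pvCount _ _ hnd, pvKeys_modify d hc]
    rw [PySem.Dict.getD_modify]
    simp only [hc, if_true]
    omega
  · rw [Multiset.count_erase_of_ne hac, pvCount _ _ hnd, pvKeys_modify d hc,
      PySem.Dict.getD_modify]
    simp [hac]

lemma pvDfsB_eq : ∀ (fuel : Nat) (d : PySem.Dict Char Int), d.keys.Nodup →
    (∀ c ∈ d.keys, 0 ≤ d.getD c 0) → (pvMS d).card < fuel →
    pvDfsB fuel d = (pvF (pvMS d) : Int) := by
  intro fuel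
  induction fuel with
  | zero => intro d _ _ h; omega
  | succ fuel ih =>
    intro d hnd hpos hcard
    rw [pvDfsB]
    rw [PySem.List.foldl_ite_eq_foldl_filter (fun c => d.getD c 0 ≠ 0)
      (fun total c => total + (1 + pvDfsB fuel (d.modify c 0 (· - 1))))]
    rw [PySem.List.foldl_add _ (fun c => 1 + pvDfsB fuel (d.modify c 0 (· - 1)))]
    set l' := d.keys.filter (fun c => decide (d.getD c 0 ≠ 0)) with hl'
    have hmem : ∀ c ∈ l', c ∈ d.keys ∧ 0 < d.getD c 0 := by
      intro c hcl
      rcases List.mem_filter.mp hcl with ⟨h1, h2⟩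
      refine ⟨h1, ?_⟩
      have := hpos c h1
      have h2' : d.getD c 0 ≠ 0 := by simpa using h2
      omega
    have hrec : ∀ c ∈ l', pvDfsB fuel (d.modify c 0 (· - 1)) = (pvF ((pvMS d).erase c) : Int) := by
      intro c hcl
      rcases hmem c hcl with ⟨hck, hcpos⟩
      rw [← pvMS_modify d hnd hck hcpos]
      apply ih
      · rw [pvKeys_modify d hck]; exact hnd
      · intro a ha
        rw [pvKeys_modify d hck] at ha
        rw [PySem.Dict.getD_modify]
        by_cases hac : a = c
        · subst hac; rw [if_pos rfl]; omega
        · rw [if_neg hac]; exact hpos a ha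
      · rw [pvMS_modify d hnd hck hcpos]
        have := Multiset.card_erase_lt_of_mem
          (s := pvMS d) (a := c) ?_
        · omega
        · rw [← Multiset.count_pos]; unfold pvMS; rw [pvCount _ _ hnd]
          simp only [hck, if_true]; omega
    have hmap : l'.map (fun c => (1:Int) + pvDfsB fuel (d.modify c 0 (· - 1)))
        = l'.map (fun c => ((1 + pvF ((pvMS d).erase c) : Nat) : Int)) := by
      apply List.map_congr_left
      intro c hcl
      rw [hrec c hcl]
      push_cast
      ring
    rw [hmap]
    have hnd' : l'.Nodup := hnd.filter _
    have hfin : l'.toFinset = (pvMS d).toFinset := by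
      ext a
      simp only [List.mem_toFinset, Multiset.mem_toFinset, hl', List.mem_filter,
        decide_eq_true_eq]
      rw [← Multiset.count_pos]; unfold pvMS; rw [pvCount _ _ hnd]
      constructor
      · rintro ⟨h1, h2⟩; simp only [h1, if_true]; have := hpos a h1; omega
      · intro h
        by_cases h1 : a ∈ d.keys
        · refine ⟨h1, ?_⟩; simp only [h1, if_true] at h; omega
        · simp [h1] at h
    rw [← List.sum_toFinset _ hnd', hfin, pvF_eq]
    push_cast
    simp

lemma pvB_eq (titles : String) :
    numTitlePossibilities_alt titles = (pvF (titles.toList : Multiset Char) : Int) := by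
  unfold numTitlePossibilities_alt
  rw [PySem.Dict.foldl_insert_getD_add_one_eq_counter]
  rw [pvDfsB_eq _ _ (PySem.Dict.nodup_keys_counter _)
      (by intro c _; rw [PySem.Dict.getD_counter]; positivity)
      (by rw [pvMS_counter]; simp), pvMS_counter]

-- ===== VERDICT (by name: the statement is the Claim_ definition above) =====
theorem numTitlePossibilities_spec : Claim_equal_numTitlePossibilities := by
  intro titles _
  unfold Spec_numTitlePossibilities
  rw [pvA_eq, pvB_eq]
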